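-- pv_equiv track=rewrite | github.com/Sakshamm-Goyal/Fashion-Recommendor | services/playwright_product_verifier.py | _check_out_of_stock
-- ===== SOURCE A (Python) =====
-- def _check_out_of_stock(html: str) -> bool:
--     """Check if page indicates out of stock"""
--     out_of_stock_terms = [
--         'out of stock',
--         'sold out',
--         'currently unavailable',
--         'not available',
--         'temporarily unavailable'
--     ]
--
--     html_lower = html.lower()
--     for term in out_of_stock_terms:
--         if term in html_lower:
--             return True
--
--     return False
-- ===== SOURCE B (Python) =====
-- def _check_out_of_stock(html: str) -> bool:
--     """Check if page indicates out of stock.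
--
--     Single left-to-right pass over the lowered text: at each position test
--     whether any of the phrases starts there (position-major instead of A's
--     term-major repeated full scans)."""
--     terms = ('out of stock',
--              'sold out',
--              'currently unavailable',
--              'not available',
--              'temporarily unavailable')
--     s = html.lower()
--     return any(s.startswith(t, i) for i in range(len(s)) for t in terms)
-- ===== Notes on version B (the rewrite author's own statement) =====
-- stated objective: alternative
-- what changed: A scans the whole lowered text once per phrase (term-major, early return); B makes a single left-to-right pass over positions of the lowered text, testing all five phrases at each offset with startswith.
import Mathlib
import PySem

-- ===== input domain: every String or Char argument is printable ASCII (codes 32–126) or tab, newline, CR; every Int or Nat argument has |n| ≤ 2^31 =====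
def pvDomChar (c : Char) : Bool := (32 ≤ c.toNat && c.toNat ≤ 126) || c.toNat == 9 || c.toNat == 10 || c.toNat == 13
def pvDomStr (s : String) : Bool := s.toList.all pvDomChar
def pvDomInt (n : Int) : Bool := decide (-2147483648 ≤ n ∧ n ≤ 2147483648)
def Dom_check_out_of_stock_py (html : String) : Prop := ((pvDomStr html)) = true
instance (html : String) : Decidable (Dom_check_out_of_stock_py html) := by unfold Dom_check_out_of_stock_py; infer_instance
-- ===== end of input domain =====

-- B replaces A's per-phrase full scans by one position-major pass over the lowered
-- text, checking all phrases at each offset (alternative decomposition, same cost).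

-- ===== PORT A =====
-- A's term list
def pvTermsA : List String :=
  ["out of stock", "sold out", "currently unavailable", "not available", "temporarily unavailable"]

-- A's 'for term in out_of_stock_terms: if term in html_lower: return True' loop
def pvLoopA : List String → String → Bool
  | [], _ => false
  | t :: rest, s => if PySem.Str.isIn t s then true else pvLoopA rest s

def check_out_of_stock_py (html : String) : Bool :=
  pvLoopA pvTermsA (PySem.Str.lower html)

-- ===== PORT B =====
-- B's phrase tuple (as char lists, since B's scan works position-wise over chars)
def pvTermsB : List (List Char) :=
  [('o'::'u'::'t'::' '::'o'::'f'::' '::'s'::'t'::'o'::'c'::'k'::[]),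
   ('s'::'o'::'l'::'d'::' '::'o'::'u'::'t'::[]),
   ('c'::'u'::'r'::'r'::'e'::'n'::'t'::'l'::'y'::' '::'u'::'n'::'a'::'v'::'a'::'i'::'l'::'a'::'b'::'l'::'e'::[]),
   ('n'::'o'::'t'::' '::'a'::'v'::'a'::'i'::'l'::'a'::'b'::'l'::'e'::[]),
   ('t'::'e'::'m'::'p'::'o'::'r'::'a'::'r'::'i'::'l'::'y'::' '::'u'::'n'::'a'::'v'::'a'::'i'::'l'::'a'::'b'::'l'::'e'::[])]

-- any(s.startswith(t, i) for i in range(len(s)) for t in terms): one pass over positions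
def check_out_of_stock_py_alt (html : String) : Bool :=
  let cs := PySem.Chars.lower html.toList
  (List.range cs.length).any (fun i => pvTermsB.any (fun t => t.isPrefixOf (cs.drop i)))

-- ===== PRECONDITION & SPEC =====
def Spec_check_out_of_stock_py (html : String) (out : Bool) : Prop := out = check_out_of_stock_py_alt html
instance (html : String) (out : Bool) : Decidable (Spec_check_out_of_stock_py html out) := by unfold Spec_check_out_of_stock_py; infer_instance

-- ===== CLAIM (what is proved, stated in full; the proofs are below) =====
def Claim_equal_check_out_of_stock_py : Prop := ∀ (html : String), Dom_check_out_of_stock_py html → Spec_check_out_of_stock_py html (check_out_of_stock_py html)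

-- ===== LEMMAS AND PROOFS =====

-- A's early-return loop is 'any term is contained'
theorem pvLoopA_eq_any (ts : List String) (s : String) :
    pvLoopA ts s = ts.any (fun t => PySem.Str.isIn t s) := by
  induction ts with
  | nil => rfl
  | cons t rest ih =>
    simp only [pvLoopA, List.any_cons, ih]
    cases h : PySem.Str.isIn t s <;> simp

-- containment of a NONEMPTY pattern ↔ some position below the length has it as a prefix
theorem pvIsIn_iff_pos (t cs : List Char) (ht : t ≠ []) :
    PySem.Chars.isIn t cs = true ↔
      ∃ i ∈ List.range cs.length, t.isPrefixOf (cs.drop i) = true := by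
  rw [← PySem.Chars.exists_prefix_drop_iff_isIn]
  constructor
  · rintro ⟨j, hj⟩
    have hjlt : j < cs.length := by
      by_contra hle
      have : cs.drop j = [] := List.drop_eq_nil_of_le (by omega)
      rw [this] at hj
      exact ht (List.prefix_nil.mp hj)
    exact ⟨j, List.mem_range.mpr hjlt, List.isPrefixOf_iff_prefix.mpr hj⟩
  · rintro ⟨i, _, hp⟩
    exact ⟨i, List.isPrefixOf_iff_prefix.mp hp⟩

-- the two traversal orders agree
theorem pvMain (html : String) :
    check_out_of_stock_py html = check_out_of_stock_py_alt html := by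
  unfold check_out_of_stock_py check_out_of_stock_py_alt
  rw [pvLoopA_eq_any]
  rw [Bool.eq_iff_iff]
  simp only [List.any_eq_true, PySem.Str.isIn_eq, PySem.Str.toList_lower]
  constructor
  · rintro ⟨t, ht, hin⟩
    have htB : t.toList ∈ pvTermsB ∧ t.toList ≠ [] := by
      fin_cases ht <;> exact ⟨by decide, by decide⟩
    obtain ⟨i, hi, hp⟩ := (pvIsIn_iff_pos t.toList _ htB.2).mp hin
    exact ⟨i, hi, t.toList, htB.1, hp⟩
  · rintro ⟨i, hi, t, htB, hp⟩
    have : ∃ s ∈ pvTermsA, s.toList = t ∧ t ≠ [] := by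
      fin_cases htB <;> decide
    obtain ⟨s, hsA, hst, htne⟩ := this
    exact ⟨s, hsA, (pvIsIn_iff_pos s.toList _ (hst ▸ htne)).mpr ⟨i, hi, hst ▸ hp⟩⟩

-- ===== VERDICT (by name: the statement is the Claim_ definition above) =====
theorem check_out_of_stock_py_spec : Claim_equal_check_out_of_stock_py := by
  intro html _
  exact pvMain html
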